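-- pv_equiv track=rewrite | github.com/walkernr/RAGMAN | core/model_handler.py | bin_packing_indices
-- ===== SOURCE A (Python) =====
-- def bin_packing_indices(lengths, threshold, overlap):
--     """
--     gets the optimal bin packing indices for a list of lengths
--     input: lengths (list[int])
--            threshold (int)
--            overlap (int)
--     output: bins (list[tuple[int, int]])
--     """
--     bins = []
--     start = 0
--     current_sum = 0
--     for end, length in enumerate(lengths):
--         current_sum += length
--         if current_sum > threshold:
--             bins.append((start, end))
--             overlap_start = end
--             overlap_sum = lengths[overlap_start]
--             while (
--                 overlap_start > start
--                 and overlap_sum + lengths[overlap_start - 1] <= overlap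
--             ):
--                 overlap_start -= 1
--                 overlap_sum += lengths[overlap_start]
--             start = overlap_start
--             current_sum = sum(lengths[start : end + 1])
--     bins.append((start, len(lengths)))
--     return bins
-- ===== SOURCE B (Python) =====
-- def bin_packing_indices(lengths, threshold, overlap):
--     # prefix-sum reformulation: prefix[i] = sum(lengths[:i]) computed once,
--     # so every window sum is a prefix difference (no re-summing, no running
--     # accumulators carried between iterations).
--     prefix = [0]
--     acc = 0
--     for x in lengths:
--         acc += x
--         prefix.append(acc)
--     bins = []
--     start = 0
--     for end in range(len(lengths)):
--         if prefix[end + 1] - prefix[start] > threshold: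
--             bins.append((start, end))
--             j = end
--             while j > start and prefix[end + 1] - prefix[j - 1] <= overlap:
--                 j -= 1
--             start = j
--     bins.append((start, len(lengths)))
--     return bins
-- ===== Notes on version B (the rewrite author's own statement) =====
-- stated objective: alternative
-- what changed: B precomputes a prefix-sum array once and tests every window sum as a prefix difference, replacing A's running accumulators and its sum(lengths[start:end+1]) re-summation after each bin; same worst-case cost (the backtracking loop dominates).
import Mathlib
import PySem

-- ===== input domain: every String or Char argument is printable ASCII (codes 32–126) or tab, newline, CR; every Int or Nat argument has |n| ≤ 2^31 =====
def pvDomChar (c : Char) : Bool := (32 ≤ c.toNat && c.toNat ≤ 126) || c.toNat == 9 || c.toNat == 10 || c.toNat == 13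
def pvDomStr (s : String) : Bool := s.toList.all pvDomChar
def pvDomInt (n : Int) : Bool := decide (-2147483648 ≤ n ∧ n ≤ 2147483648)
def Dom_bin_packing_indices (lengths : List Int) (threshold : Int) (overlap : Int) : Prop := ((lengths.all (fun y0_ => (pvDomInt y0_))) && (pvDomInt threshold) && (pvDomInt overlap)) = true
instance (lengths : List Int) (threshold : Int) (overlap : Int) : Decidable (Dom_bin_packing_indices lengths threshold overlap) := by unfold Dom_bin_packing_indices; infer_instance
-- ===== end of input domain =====

-- B reformulates A over a precomputed prefix-sum array: window sums become prefix
-- differences, with no running accumulators and no slice re-summation; same output.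

-- ===== PORT A =====
-- A's inner while loop: backs 'overlap_start' up from 'end' while the growing
-- overlap window stays ≤ overlap.  Indices j-1 are provably in range, so the
-- Python lengths[overlap_start-1] access is ported as getD (never raises here).
def pvA_while (lengths : List Int) (overlap : Int) (start : Nat) : Nat → Int → Nat
  | j, osum =>
    if _h : start < j ∧ osum + lengths.getD (j - 1) 0 ≤ overlap then
      pvA_while lengths overlap start (j - 1) (osum + lengths.getD (j - 1) 0)
    else j
  termination_by j _ => j
  decreasing_by omega

-- A's main for-loop over enumerate(lengths), state (bins, start, current_sum)
def pvA_loop (lengths : List Int) (threshold overlap : Int) :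
    Nat → List (Int × Int) → Nat → Int → List (Int × Int)
  | e, bins, start, csum =>
    if he : e < lengths.length then
      let csum1 := csum + lengths.getD e 0
      if csum1 > threshold then
        let j := pvA_while lengths overlap start e (lengths.getD e 0)
        -- current_sum = sum(lengths[start:end+1]) with the new start
        pvA_loop lengths threshold overlap (e + 1) (bins ++ [((start : Int), (e : Int))]) j
          (PySem.List.slice lengths (some (j : Int)) (some ((e : Int) + 1))).sum
      else
        pvA_loop lengths threshold overlap (e + 1) bins start csum1
    else
      bins ++ [((start : Int), (lengths.length : Int))]
  termination_by e _ _ _ => lengths.length - e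
  decreasing_by all_goals omega

def bin_packing_indices (lengths : List Int) (threshold : Int) (overlap : Int) : List (Int × Int) :=
  pvA_loop lengths threshold overlap 0 [] 0 0

-- ===== PORT B =====
-- prefix = [0]; acc = 0; for x in lengths: acc += x; prefix.append(acc)
def pvB_prefix (lengths : List Int) : List Int :=
  (lengths.foldl (fun (p : List Int × Int) x => (p.1 ++ [p.2 + x], p.2 + x)) ([0], 0)).1

-- B's backtracking loop over the prefix array (all indices in range: getD)
def pvB_back (pfx : List Int) (overlap pe1 : Int) (start : Nat) : Nat → Nat
  | j =>
    if _h : start < j ∧ pe1 - pfx.getD (j - 1) 0 ≤ overlap then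
      pvB_back pfx overlap pe1 start (j - 1)
    else j
  termination_by j => j
  decreasing_by omega

def pvB_loop (pfx : List Int) (threshold overlap : Int) (n : Nat) :
    Nat → List (Int × Int) → Nat → List (Int × Int)
  | e, bins, start =>
    if he : e < n then
      if pfx.getD (e + 1) 0 - pfx.getD start 0 > threshold then
        let j := pvB_back pfx overlap (pfx.getD (e + 1) 0) start e
        pvB_loop pfx threshold overlap n (e + 1) (bins ++ [((start : Int), (e : Int))]) j
      else
        pvB_loop pfx threshold overlap n (e + 1) bins start
    else
      bins ++ [((start : Int), (n : Int))]
  termination_by e _ _ => n - e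
  decreasing_by all_goals omega

def bin_packing_indices_alt (lengths : List Int) (threshold : Int) (overlap : Int) : List (Int × Int) :=
  pvB_loop (pvB_prefix lengths) threshold overlap lengths.length 0 [] 0

-- ===== PRECONDITION & SPEC =====
def Spec_bin_packing_indices (lengths : List Int) (threshold : Int) (overlap : Int) (out : List (Int × Int)) : Prop := out = bin_packing_indices_alt lengths threshold overlap
instance (lengths : List Int) (threshold : Int) (overlap : Int) (out : List (Int × Int)) : Decidable (Spec_bin_packing_indices lengths threshold overlap out) := by unfold Spec_bin_packing_indices; infer_instance

-- ===== CLAIM (what is proved, stated in full; the proofs are below) =====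
def Claim_equal_bin_packing_indices : Prop := ∀ (lengths : List Int) (threshold : Int) (overlap : Int), Dom_bin_packing_indices lengths threshold overlap → Spec_bin_packing_indices lengths threshold overlap (bin_packing_indices lengths threshold overlap)

-- ===== LEMMAS AND PROOFS =====

-- S i = sum of the first i lengths
def pvS (lengths : List Int) (i : Nat) : Int := ((lengths.take i).sum)

-- running prefix sums starting from accumulator s
def pvPS (s : Int) : List Int → List Int
  | [] => []
  | x :: l => (s + x) :: pvPS (s + x) l

lemma pvB_prefix_go (l : List Int) : ∀ (p : List Int) (s : Int),
    (l.foldl (fun (q : List Int × Int) x => (q.1 ++ [q.2 + x], q.2 + x)) (p, s))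
      = (p ++ pvPS s l, s + l.sum) := by
  induction l with
  | nil => intro p s; simp [pvPS]
  | cons x l ih =>
      intro p s
      simp only [List.foldl_cons, ih (p ++ [s + x]) (s + x), pvPS, List.sum_cons,
        List.append_assoc, List.singleton_append]
      rw [add_assoc]

lemma pvPS_getD (l : List Int) : ∀ (s : Int) (k : Nat), k < l.length →
    (pvPS s l).getD k 0 = s + (l.take (k + 1)).sum := by
  induction l with
  | nil => intro s k h; simp at h
  | cons x l ih =>
      intro s k h
      cases k with
      | zero => simp [pvPS]
      | succ m =>
          simp only [pvPS, List.getD_cons_succ, List.take_succ_cons, List.sum_cons]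
          rw [ih (s + x) m (by simpa using h)]
          ring

lemma pvB_prefix_getD (lengths : List Int) (i : Nat) (hi : i ≤ lengths.length) :
    (pvB_prefix lengths).getD i 0 = pvS lengths i := by
  unfold pvB_prefix
  rw [pvB_prefix_go]
  cases i with
  | zero => simp [pvS]
  | succ k =>
      have hk : k < lengths.length := by omega
      simpa [pvS] using pvPS_getD lengths 0 k hk

lemma pvS_succ (lengths : List Int) (i : Nat) (hi : i < lengths.length) :
    pvS lengths (i + 1) = pvS lengths i + lengths.getD i 0 := by
  unfold pvS
  rw [List.sum_take_succ lengths i hi]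
  simp [List.getD, List.getElem?_eq_getElem hi]

lemma pv_while_eq (lengths : List Int) (overlap : Int) (start e : Nat)
    (he : e < lengths.length) :
    ∀ j osum, start ≤ j → j ≤ e → osum = pvS lengths (e + 1) - pvS lengths j →
    pvA_while lengths overlap start j osum
      = pvB_back (pvB_prefix lengths) overlap (pvS lengths (e + 1)) start j := by
  intro j
  induction j using Nat.strong_induction_on with
  | _ j ih =>
    intro osum hsj hje hosum
    rw [pvA_while, pvB_back]
    by_cases hc : start < j
    · have hj1 : j - 1 < lengths.length := by omega
      have hpre : (pvB_prefix lengths).getD (j - 1) 0 = pvS lengths (j - 1) := by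
        exact pvB_prefix_getD lengths (j - 1) (by omega)
      have hstep : pvS lengths j = pvS lengths (j - 1) + lengths.getD (j - 1) 0 := by
        have := pvS_succ lengths (j - 1) hj1
        have hj : j - 1 + 1 = j := by omega
        rwa [hj] at this
      have hcond : (osum + lengths.getD (j - 1) 0 ≤ overlap)
          ↔ (pvS lengths (e + 1) - (pvB_prefix lengths).getD (j - 1) 0 ≤ overlap) := by
        rw [hpre, hosum, hstep]; constructor <;> intro h <;> linarith
      by_cases hov : osum + lengths.getD (j - 1) 0 ≤ overlap
      · rw [dif_pos ⟨hc, hov⟩, dif_pos ⟨hc, hcond.mp hov⟩]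
        exact ih (j - 1) (by omega) _ (by omega) (by omega)
          (by rw [hosum, hstep]; ring)
      · rw [dif_neg (by tauto), dif_neg (by rw [not_and]; intro _; rw [← hcond]; exact hov)]
    · rw [dif_neg (by tauto), dif_neg (by tauto)]

lemma pv_slice_sum (lengths : List Int) (j e : Nat) (hj : j ≤ e) (_he : e < lengths.length) :
    (PySem.List.slice lengths (some (j : Int)) (some ((e : Int) + 1))).sum
      = pvS lengths (e + 1) - pvS lengths j := by
  have h1 : ((e : Int) + 1) = ((e + 1 : Nat) : Int) := by push_cast; ring
  rw [h1, PySem.List.slice_natCast]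
  unfold pvS
  have h2 : lengths.take (e + 1) = lengths.take j ++ ((lengths.drop j).take (e + 1 - j)) := by
    have : e + 1 = j + (e + 1 - j) := by omega
    rw [this, List.take_add]
    congr 2
    omega
  rw [h2, List.sum_append]
  ring

lemma pvA_while_bounds (lengths : List Int) (overlap : Int) (start : Nat) :
    ∀ j osum, start ≤ j →
    start ≤ pvA_while lengths overlap start j osum ∧
      pvA_while lengths overlap start j osum ≤ j := by
  intro j
  induction j using Nat.strong_induction_on with
  | _ j ih =>
    intro osum hsj
    rw [pvA_while]
    split_ifs with h
    · have := ih (j - 1) (by omega) (osum + lengths.getD (j - 1) 0) (by omega)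
      omega
    · omega

lemma pv_loop_eq (lengths : List Int) (threshold overlap : Int) :
    ∀ k e bins start csum, lengths.length - e = k → start ≤ e →
    csum = pvS lengths e - pvS lengths start →
    pvA_loop lengths threshold overlap e bins start csum
      = pvB_loop (pvB_prefix lengths) threshold overlap lengths.length e bins start := by
  intro k
  induction k with
  | zero =>
      intro e bins start csum hk hse hcs
      have he : ¬ e < lengths.length := by omega
      rw [pvA_loop, pvB_loop, dif_neg he, dif_neg he]
  | succ k ih =>
      intro e bins start csum hk hse hcs
      have he : e < lengths.length := by omega
      have hpe1 : (pvB_prefix lengths).getD (e + 1) 0 = pvS lengths (e + 1) :=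
        pvB_prefix_getD lengths (e + 1) (by omega)
      have hps : (pvB_prefix lengths).getD start 0 = pvS lengths start :=
        pvB_prefix_getD lengths start (by omega)
      have hc1 : csum + lengths.getD e 0 = pvS lengths (e + 1) - pvS lengths start := by
        rw [hcs, pvS_succ lengths e he]; ring
      rw [pvA_loop, pvB_loop, dif_pos he, dif_pos he]
      simp only [hpe1, hps, hc1]
      by_cases hth : pvS lengths (e + 1) - pvS lengths start > threshold
      · rw [if_pos hth, if_pos hth]
        have hosum : lengths.getD e 0 = pvS lengths (e + 1) - pvS lengths e := by
          rw [pvS_succ lengths e he]; ring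
        have hw := pv_while_eq lengths overlap start e he e (lengths.getD e 0) hse
          (le_refl e) hosum
        have hb := pvA_while_bounds lengths overlap start e (lengths.getD e 0) hse
        rw [← hw]
        exact ih (e + 1) (bins ++ [((start : Int), (e : Int))])
          (pvA_while lengths overlap start e (lengths.getD e 0)) _ (by omega) (by omega)
          (pv_slice_sum lengths _ e (by omega) he)
      · rw [if_neg hth, if_neg hth]
        exact ih (e + 1) bins start _ (by omega) (by omega) rfl
-- ===== VERDICT (by name: the statement is the Claim_ definition above) =====
theorem bin_packing_indices_spec : Claim_equal_bin_packing_indices := by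
  intro lengths threshold overlap _
  unfold Spec_bin_packing_indices bin_packing_indices bin_packing_indices_alt
  exact pv_loop_eq lengths threshold overlap _ 0 [] 0 0 rfl (le_refl 0) (by simp [pvS])
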